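-- pv_equiv track=rewrite | github.com/simeg/notion-task-runner | src/notion_task_runner/tasks/record_shops/record_shops_task.py | _format_shop_list
-- ===== SOURCE A (Python) =====
-- def _format_shop_list(shops: list[tuple[str, str, str]]) -> str:
--     """
--     Format list of shops into a readable string grouped by city part.
--
--     Args:
--         shops: List of tuples (shop_name, opening_hours, city_part)
--
--     Returns:
--         Formatted string with city parts as headers and shops as bullet points
--     """
--     if not shops:
--         return "No shops open"
--
--     lines = []
--     current_city_part = None
--
--     for name, hours, city_part in shops:
--         # Add city part header when it changes
--         if city_part != current_city_part:
--             if current_city_part is not None: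
--                 lines.append("")  # Empty line between city parts
--             lines.append(f"{city_part}")
--             current_city_part = city_part
--
--         lines.append(f"- {name} {hours}")
--
--     return "\n".join(lines)
-- ===== SOURCE B (Python) =====
-- def _format_shop_list(shops: list[tuple[str, str, str]]) -> str:
--     """Group-then-join rewrite: split shops into consecutive runs sharing a
--     city part, render each run as one block, and join blocks with blank lines."""
--     if not shops:
--         return "No shops open"
--     return "\n\n".join(_block(city, group) for city, group in _runs(shops))
--
--
-- def _runs(shops):
--     """Consecutive runs of shops with the same city part (shops[i][2])."""
--     runs = []
--     while shops:
--         city = shops[0][2]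
--         k = 1
--         while k < len(shops) and shops[k][2] == city:
--             k += 1
--         runs.append((city, shops[:k]))
--         shops = shops[k:]
--     return runs
--
--
-- def _block(city, group):
--     return "\n".join([city] + [f"- {name} {hours}" for name, hours, _ in group])
-- ===== Notes on version B (the rewrite author's own statement) =====
-- stated objective: idiomatic
-- what changed: Replaces A's single stateful pass (tracking the previous city part and inserting blank-separator lines into one flat list) with a group-then-join decomposition: split the list into consecutive runs by city part, render each run as a self-contained block, and join the blocks with '\n\n'.
import Mathlib
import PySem

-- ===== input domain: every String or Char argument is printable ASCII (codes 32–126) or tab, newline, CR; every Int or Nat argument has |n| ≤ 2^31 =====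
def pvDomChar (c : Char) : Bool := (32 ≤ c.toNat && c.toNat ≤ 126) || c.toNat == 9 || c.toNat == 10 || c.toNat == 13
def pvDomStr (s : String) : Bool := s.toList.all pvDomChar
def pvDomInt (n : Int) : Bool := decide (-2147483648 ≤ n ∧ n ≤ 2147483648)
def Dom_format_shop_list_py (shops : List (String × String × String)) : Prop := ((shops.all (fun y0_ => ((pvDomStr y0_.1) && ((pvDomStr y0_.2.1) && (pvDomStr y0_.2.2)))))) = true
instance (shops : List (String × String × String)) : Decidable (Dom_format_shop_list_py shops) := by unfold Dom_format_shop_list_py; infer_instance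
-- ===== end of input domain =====

-- B replaces A's stateful single pass (inserting blank separator lines into one flat list)
-- with an idiomatic group-then-join decomposition: runs by city part, one block per run,
-- blocks joined with "\n\n". Equal output is proved on all inputs.

-- ===== PORT A =====
-- the loop over shops: state = (lines, current_city_part)
def fsA_loop : List (String × String × String) → List String → Option String → List String
  | [], lines, _ => lines
  | (name, hours, city_part) :: rest, lines, cur =>
      let lines' :=
        if some city_part ≠ cur then
          (if cur.isSome then lines ++ [""] else lines) ++ [city_part]
        else lines
      fsA_loop rest (lines' ++ ["- " ++ name ++ " " ++ hours]) (some city_part)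

def format_shop_list_py (shops : List (String × String × String)) : String :=
  if shops = [] then "No shops open"
  else PySem.Str.join "\n" (fsA_loop shops [] none)

-- ===== PORT B =====
-- _runs: consecutive runs of shops sharing a city part (inner while = takeWhile on the tail)
def fsB_runs : List (String × String × String) → List (String × List (String × String × String))
  | [] => []
  | (name, hours, city) :: xs =>
      let g := xs.takeWhile (fun t => t.2.2 == city)
      (city, (name, hours, city) :: g) :: fsB_runs (xs.dropWhile (fun t => t.2.2 == city))
  termination_by shops => shops.length
  decreasing_by
    simpa using Nat.lt_succ_of_le (List.length_dropWhile_le _ _)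

-- _block: header line plus one bullet line per shop of the run
def fsB_block (city : String) (group : List (String × String × String)) : String :=
  PySem.Str.join "\n" (city :: group.map (fun t => "- " ++ t.1 ++ " " ++ t.2.1))

def format_shop_list_py_alt (shops : List (String × String × String)) : String :=
  if shops = [] then "No shops open"
  else PySem.Str.join "\n\n" ((fsB_runs shops).map (fun r => fsB_block r.1 r.2))

-- ===== PRECONDITION & SPEC =====
def Spec_format_shop_list_py (shops : List (String × String × String)) (out : String) : Prop := out = format_shop_list_py_alt shops
instance (shops : List (String × String × String)) (out : String) : Decidable (Spec_format_shop_list_py shops out) := by unfold Spec_format_shop_list_py; infer_instance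

-- ===== CLAIM (what is proved, stated in full; the proofs are below) =====
def Claim_equal_format_shop_list_py : Prop := ∀ (shops : List (String × String × String)), Dom_format_shop_list_py shops → Spec_format_shop_list_py shops (format_shop_list_py shops)

-- ===== LEMMAS AND PROOFS =====

-- the bullet line of one shop
def fsBullet (t : String × String × String) : String := "- " ++ t.1 ++ " " ++ t.2.1

-- the lines A's loop appends when started with current_city_part = cur
def fsGen : List (String × String × String) → Option String → List String
  | [], _ => []
  | (name, hours, city_part) :: rest, cur =>
      (if some city_part ≠ cur then (if cur.isSome then [""] else []) ++ [city_part] else [])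
        ++ ["- " ++ name ++ " " ++ hours] ++ fsGen rest (some city_part)

-- blocks (as line lists) separated by one empty line
def fsSep : List (List String) → List String
  | [] => []
  | [b] => b
  | b :: bs => b ++ "" :: fsSep bs

theorem fsA_loop_eq_append (shops : List (String × String × String))
    (lines : List String) (cur : Option String) :
    fsA_loop shops lines cur = lines ++ fsGen shops cur := by
  induction shops generalizing lines cur with
  | nil => simp [fsA_loop, fsGen]
  | cons t rest ih =>
      obtain ⟨name, hours, city⟩ := t
      simp only [fsA_loop, fsGen]
      rw [ih]
      split_ifs with h1 h2 <;> simp_all [List.append_assoc]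

theorem fsGen_run (g rest : List (String × String × String)) (c : String)
    (hg : ∀ t ∈ g, t.2.2 = c) :
    fsGen (g ++ rest) (some c) = g.map fsBullet ++ fsGen rest (some c) := by
  induction g with
  | nil => simp
  | cons t g ih =>
      obtain ⟨name, hours, city⟩ := t
      have hc : city = c := hg (name, hours, city) (by simp)
      subst hc
      simp only [List.cons_append, fsGen]
      rw [ih (fun t ht => hg t (List.mem_cons_of_mem _ ht))]
      simp [fsBullet]

theorem fsGen_ne_city (shops : List (String × String × String)) (c : String)
    (hne : ∀ h cs, shops = h :: cs → h.2.2 ≠ c) :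
    fsGen shops (some c) = (if shops = [] then [] else [""]) ++ fsGen shops none := by
  cases shops with
  | nil => simp [fsGen]
  | cons t rest =>
      obtain ⟨name, hours, city⟩ := t
      have : city ≠ c := hne (name, hours, city) rest rfl
      simp [fsGen, this]

theorem fsB_runs_ne_nil (shops : List (String × String × String)) (h : shops ≠ []) :
    fsB_runs shops ≠ [] := by
  cases shops with
  | nil => exact absurd rfl h
  | cons t rest => obtain ⟨name, hours, city⟩ := t; simp [fsB_runs]

-- A's generated lines are B's blocks separated by empty lines
theorem fsGen_eq_fsSep (shops : List (String × String × String)) :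
    fsGen shops none = fsSep ((fsB_runs shops).map (fun r => r.1 :: r.2.map fsBullet)) := by
  induction hn : shops.length using Nat.strong_induction_on generalizing shops with
  | _ n ih =>
    cases shops with
    | nil => simp [fsGen, fsB_runs, fsSep]
    | cons t xs =>
      obtain ⟨name, hours, city⟩ := t
      have hsplit : xs.takeWhile (fun t => t.2.2 == city) ++ xs.dropWhile (fun t => t.2.2 == city) = xs :=
        List.takeWhile_append_dropWhile
      have hmem : ∀ t ∈ xs.takeWhile (fun t => t.2.2 == city), t.2.2 = city := by
        intro t ht
        simpa using List.mem_takeWhile_imp ht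
      have hdroplen : (xs.dropWhile (fun t => t.2.2 == city)).length < n := by
        have := List.length_dropWhile_le (fun t : String × String × String => t.2.2 == city) xs
        simp only [List.length_cons] at hn
        omega
      have hdrophead : ∀ h cs, xs.dropWhile (fun t => t.2.2 == city) = h :: cs → h.2.2 ≠ city := by
        intro h cs hEq
        have := List.head?_dropWhile_not (fun t : String × String × String => t.2.2 == city) xs
        rw [hEq] at this
        simpa using this
      simp only [fsGen, Option.isSome_none, ne_eq, reduceCtorEq, not_false_eq_true, if_true,
        Bool.false_eq_true, if_false, List.nil_append, fsB_runs]
      conv_lhs => rw [← hsplit]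
      rw [fsGen_run _ _ city hmem]
      rw [fsGen_ne_city _ city hdrophead]
      rw [ih _ hdroplen _ rfl]
      by_cases hd : xs.dropWhile (fun t => t.2.2 == city) = []
      · simp [hd, fsB_runs, fsSep, fsBullet]
      · have hruns := fsB_runs_ne_nil _ hd
        cases hEq : (fsB_runs (xs.dropWhile (fun t => t.2.2 == city))).map
            (fun r => r.1 :: r.2.map fsBullet) with
        | nil => exact absurd (List.map_eq_nil_iff.mp hEq) hruns
        | cons b bs => simp [hd, fsSep, fsBullet, hEq]

-- joining separated blocks with "\n" = joining per-block joins with "\n\n"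
-- (char-level copy of fsSep, used only by the proofs)
def fsSepC : List (List (List Char)) → List (List Char)
  | [] => []
  | [b] => b
  | b :: bs => b ++ [] :: fsSepC bs

theorem fsSepC_eq : ∀ (bs : List (List String)),
    fsSepC (bs.map (fun b => b.map String.toList)) = (fsSep bs).map String.toList
  | [] => by simp [fsSepC, fsSep]
  | [b] => by simp [fsSepC, fsSep]
  | b :: b2 :: bs => by
      have := fsSepC_eq (b2 :: bs)
      simp only [List.map_cons, fsSepC, fsSep] at this ⊢
      simp [this]

theorem chars_join_append (sep : List Char) (xs ys : List (List Char))
    (hxs : xs ≠ []) (hys : ys ≠ []) :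
    PySem.Chars.join sep (xs ++ ys) = PySem.Chars.join sep xs ++ sep ++ PySem.Chars.join sep ys := by
  induction xs with
  | nil => exact absurd rfl hxs
  | cons x xs ih =>
    cases xs with
    | nil =>
      cases ys with
      | nil => exact absurd rfl hys
      | cons y ys => simp [PySem.Chars.join_cons_cons, PySem.Chars.join_singleton]
    | cons x2 xs2 =>
      have hih := ih (by simp)
      have h1 : (x :: x2 :: xs2) ++ ys = x :: ((x2 :: xs2) ++ ys) := by simp
      have h2 : (x2 :: xs2) ++ ys = x2 :: (xs2 ++ ys) := by simp
      rw [h1, h2, PySem.Chars.join_cons_cons, ← h2, hih, PySem.Chars.join_cons_cons]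
      simp [List.append_assoc]

theorem chars_join_sepC : ∀ (cs : List (List (List Char))), (∀ c ∈ cs, c ≠ []) →
    PySem.Chars.join ['\n'] (fsSepC cs)
      = PySem.Chars.join ['\n', '\n'] (cs.map (PySem.Chars.join ['\n']))
  | [], _ => by simp [fsSepC]
  | [b], _ => by simp [fsSepC, PySem.Chars.join_singleton]
  | b :: b2 :: rest2, hcs => by
      have hb : b ≠ [] := hcs b (by simp)
      have hrest : ∀ c ∈ b2 :: rest2, c ≠ [] := fun c hc => hcs c (by simp [hc])
      have ihr := chars_join_sepC (b2 :: rest2) hrest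
      have hsep2 : fsSepC (b :: b2 :: rest2) = b ++ [] :: fsSepC (b2 :: rest2) := rfl
      have hnn : ([] : List Char) :: fsSepC (b2 :: rest2) ≠ [] := by simp
      rw [hsep2, chars_join_append _ _ _ hb hnn]
      have hsc : fsSepC (b2 :: rest2) ≠ [] := by
        cases rest2 with
        | nil =>
          have : b2 ≠ [] := hrest b2 (by simp)
          simpa [fsSepC] using this
        | cons c cs => simp [fsSepC]
      cases hEq : fsSepC (b2 :: rest2) with
      | nil => exact absurd hEq hsc
      | cons p ps =>
        rw [PySem.Chars.join_cons_cons, ← hEq, ihr]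
        conv_rhs => rw [List.map_cons, List.map_cons, PySem.Chars.join_cons_cons]
        simp [List.append_assoc]

theorem str_join_sep (bs : List (List String)) (hne : ∀ b ∈ bs, b ≠ []) :
    PySem.Str.join "\n" (fsSep bs) = PySem.Str.join "\n\n" (bs.map (PySem.Str.join "\n")) := by
  apply String.toList_inj.mp
  rw [PySem.Str.toList_join, PySem.Str.toList_join]
  have h := chars_join_sepC (bs.map (fun b => b.map String.toList)) (by
    intro c hc
    obtain ⟨b, hb, rfl⟩ := List.mem_map.mp hc
    simpa using hne b hb)
  rw [fsSepC_eq] at h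
  have h1 : ("\n" : String).toList = ['\n'] := rfl
  have h2 : ("\n\n" : String).toList = ['\n', '\n'] := rfl
  rw [h1, h2, h]
  congr 1
  simp only [List.map_map]
  refine List.map_congr_left ?_
  intro b _
  rw [Function.comp_apply, Function.comp_apply, PySem.Str.toList_join, h1]

-- ===== VERDICT (by name: the statement is the Claim_ definition above) =====
theorem format_shop_list_py_spec : Claim_equal_format_shop_list_py := by
  intro shops _
  unfold Spec_format_shop_list_py format_shop_list_py format_shop_list_py_alt
  by_cases h : shops = []
  · simp [h]
  · simp only [h, if_false]
    rw [fsA_loop_eq_append, List.nil_append, fsGen_eq_fsSep]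
    have hblocks : ∀ b ∈ (fsB_runs shops).map (fun r => r.1 :: r.2.map fsBullet), b ≠ [] := by
      intro b hb
      obtain ⟨r, _, rfl⟩ := List.mem_map.mp hb
      simp
    rw [str_join_sep _ hblocks]
    congr 1
    simp only [List.map_map]
    refine List.map_congr_left ?_
    intro r _
    have hb : fsBullet = fun t : String × String × String => "- " ++ t.1 ++ " " ++ t.2.1 := rfl
    rw [hb]
    rfl
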